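-- pv_equiv track=rewrite | github.com/rsicarelli/fakt | scripts/convert-markdown.py | get_category_for_file
-- ===== SOURCE A (Python) =====
-- CATEGORY_MAPPING = {
--     "Getting Started": ["README"],
--     "Architecture": ["ARCHITECTURE", "METRO_FIR_IR_SPECIFICATIONS", "IR_NATIVE_DEMO", "IR_NATIVE_DEMONSTRATION"],
--     "Specifications": ["API_SPECIFICATIONS", "COMPILE_TIME_GENERIC_SOLUTIONS", "CODE_GENERATION_STRATEGIES"],
--     "Testing": ["TESTING_GUIDELINES", "TESTING_STATUS_REPORT", "TEST_COVERAGE_ANALYSIS"],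
--     "Implementation": [
--         "CURRENT_STATUS", "IMPLEMENTATION_ROADMAP", "IMPLEMENTATION_DECISION",
--         "GENERIC_IMPLEMENTATION_PROGRESS", "GENERIC_TYPE_SCOPING_ANALYSIS",
--         "KOTLIN_COMPILER_IR_API_GUIDE", "FINAL_COMPILE_TIME_SOLUTION", "COMPILE_TIME_EXAMPLES"
--     ]
-- }
--
-- CATEGORY_INDEX_FILES = {
--     "Getting Started": "getting-started",
--     "Architecture": "architecture",
--     "Specifications": "specifications",
--     "Testing": "testing",
--     "Implementation": "implementation"
-- }
--
-- def get_category_for_file(filename: str) -> tuple[str | None, str | None]: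
--     """
--     Get category name and index file for a given filename.
--     Returns (category_name, category_index_file) or (None, None) if not found.
--     """
--     # Check if this is a category index file
--     for category_name, index_file in CATEGORY_INDEX_FILES.items():
--         if filename == index_file:
--             return category_name, index_file
--
--     # Check if this is a regular doc file
--     for category_name, files in CATEGORY_MAPPING.items():
--         if filename in files:
--             index_file = CATEGORY_INDEX_FILES[category_name]
--             return category_name, index_file
--
--     return None, None
-- ===== SOURCE B (Python) =====
-- CATEGORY_MAPPING = {
--     "Getting Started": ["README"],
--     "Architecture": ["ARCHITECTURE", "METRO_FIR_IR_SPECIFICATIONS", "IR_NATIVE_DEMO", "IR_NATIVE_DEMONSTRATION"],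
--     "Specifications": ["API_SPECIFICATIONS", "COMPILE_TIME_GENERIC_SOLUTIONS", "CODE_GENERATION_STRATEGIES"],
--     "Testing": ["TESTING_GUIDELINES", "TESTING_STATUS_REPORT", "TEST_COVERAGE_ANALYSIS"],
--     "Implementation": [
--         "CURRENT_STATUS", "IMPLEMENTATION_ROADMAP", "IMPLEMENTATION_DECISION",
--         "GENERIC_IMPLEMENTATION_PROGRESS", "GENERIC_TYPE_SCOPING_ANALYSIS",
--         "KOTLIN_COMPILER_IR_API_GUIDE", "FINAL_COMPILE_TIME_SOLUTION", "COMPILE_TIME_EXAMPLES"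
--     ]
-- }
--
-- CATEGORY_INDEX_FILES = {
--     "Getting Started": "getting-started",
--     "Architecture": "architecture",
--     "Specifications": "specifications",
--     "Testing": "testing",
--     "Implementation": "implementation"
-- }
--
-- # One reverse table built once: filename -> (category, index_file).
-- FILE_TO_CATEGORY = {}
-- for _cat, _idx in CATEGORY_INDEX_FILES.items():
--     FILE_TO_CATEGORY[_idx] = (_cat, _idx)
-- for _cat, _files in CATEGORY_MAPPING.items():
--     _idx = CATEGORY_INDEX_FILES[_cat]
--     for _f in _files:
--         FILE_TO_CATEGORY[_f] = (_cat, _idx)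
--
--
-- def get_category_for_file(filename: str) -> tuple:
--     """Single precomputed-table lookup instead of two sequential scans."""
--     return FILE_TO_CATEGORY.get(filename, (None, None))
-- ===== Notes on version B (the rewrite author's own statement) =====
-- stated objective: simpler
-- what changed: Replaces the two sequential scans (over CATEGORY_INDEX_FILES then CATEGORY_MAPPING with an inner membership test) by one reverse lookup table filename -> (category, index_file) built once at module load; the function body becomes a single dict.get. The index-file names and doc filenames are disjoint, so priority order is irrelevant.
import Mathlib
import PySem

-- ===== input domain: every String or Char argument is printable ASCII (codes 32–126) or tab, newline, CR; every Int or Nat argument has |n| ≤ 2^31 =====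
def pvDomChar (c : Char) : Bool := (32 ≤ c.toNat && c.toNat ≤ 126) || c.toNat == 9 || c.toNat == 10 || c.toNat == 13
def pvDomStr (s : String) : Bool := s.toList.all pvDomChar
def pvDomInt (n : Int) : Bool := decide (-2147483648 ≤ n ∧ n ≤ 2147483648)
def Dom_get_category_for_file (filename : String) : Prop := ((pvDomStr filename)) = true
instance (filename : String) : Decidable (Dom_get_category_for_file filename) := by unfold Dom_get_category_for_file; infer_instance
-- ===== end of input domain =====

-- B replaces A's two sequential scans by one reverse lookup table built once; objective: simpler.

-- ===== PORT A =====
def CATEGORY_MAPPING : PySem.Dict String (List String) := PySem.Dict.ofList [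
  ("Getting Started", ["README"]),
  ("Architecture", ["ARCHITECTURE", "METRO_FIR_IR_SPECIFICATIONS", "IR_NATIVE_DEMO", "IR_NATIVE_DEMONSTRATION"]),
  ("Specifications", ["API_SPECIFICATIONS", "COMPILE_TIME_GENERIC_SOLUTIONS", "CODE_GENERATION_STRATEGIES"]),
  ("Testing", ["TESTING_GUIDELINES", "TESTING_STATUS_REPORT", "TEST_COVERAGE_ANALYSIS"]),
  ("Implementation", ["CURRENT_STATUS", "IMPLEMENTATION_ROADMAP", "IMPLEMENTATION_DECISION",
    "GENERIC_IMPLEMENTATION_PROGRESS", "GENERIC_TYPE_SCOPING_ANALYSIS",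
    "KOTLIN_COMPILER_IR_API_GUIDE", "FINAL_COMPILE_TIME_SOLUTION", "COMPILE_TIME_EXAMPLES"])]

def CATEGORY_INDEX_FILES : PySem.Dict String String := PySem.Dict.ofList [
  ("Getting Started", "getting-started"),
  ("Architecture", "architecture"),
  ("Specifications", "specifications"),
  ("Testing", "testing"),
  ("Implementation", "implementation")]

-- first loop of A: early return over CATEGORY_INDEX_FILES.items()
def getCatLoop1 : List (String × String) → String → Option (Option String × Option String)
  | [], _ => none
  | (c, i) :: rest, f => if f == i then some (some c, some i) else getCatLoop1 rest f

-- second loop of A: early return over CATEGORY_MAPPING.items(); the inner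
-- CATEGORY_INDEX_FILES[category_name] lookup is a Dict.get? (its key is always present here)
def getCatLoop2 : List (String × List String) → String → Option (Option String × Option String)
  | [], _ => none
  | (c, files) :: rest, f =>
      if files.contains f then some (some c, PySem.Dict.get? CATEGORY_INDEX_FILES c)
      else getCatLoop2 rest f

def get_category_for_file (filename : String) : Option String × Option String :=
  match getCatLoop1 CATEGORY_INDEX_FILES.items filename with
  | some r => r
  | none =>
    match getCatLoop2 CATEGORY_MAPPING.items filename with
    | some r => r
    | none => (none, none)

-- ===== PORT B =====
-- the reverse table of Source B, built once by the same two registration loops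
def FILE_TO_CATEGORY : PySem.Dict String (Option String × Option String) :=
  let d := CATEGORY_INDEX_FILES.items.foldl
    (fun d p => d.insert p.2 (some p.1, some p.2)) PySem.Dict.empty
  CATEGORY_MAPPING.items.foldl
    (fun d p =>
      let idx := PySem.Dict.get? CATEGORY_INDEX_FILES p.1
      p.2.foldl (fun d f => d.insert f (some p.1, idx)) d) d

def get_category_for_file_alt (filename : String) : Option String × Option String :=
  FILE_TO_CATEGORY.getD filename (none, none)

-- ===== PRECONDITION & SPEC =====
def Spec_get_category_for_file (filename : String) (out : Option String × Option String) : Prop := out = get_category_for_file_alt filename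
instance (filename : String) (out : Option String × Option String) : Decidable (Spec_get_category_for_file filename out) := by unfold Spec_get_category_for_file; infer_instance

-- ===== CLAIM (what is proved, stated in full; the proofs are below) =====
def Claim_equal_get_category_for_file : Prop := ∀ (filename : String), Dom_get_category_for_file filename → Spec_get_category_for_file filename (get_category_for_file filename)

-- ===== LEMMAS AND PROOFS =====
-- all filenames either program ever matches (= FILE_TO_CATEGORY.keys, in order)
def pvAllNames : List String :=
  ["getting-started", "architecture", "specifications", "testing", "implementation",
   "README",
   "ARCHITECTURE", "METRO_FIR_IR_SPECIFICATIONS", "IR_NATIVE_DEMO", "IR_NATIVE_DEMONSTRATION",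
   "API_SPECIFICATIONS", "COMPILE_TIME_GENERIC_SOLUTIONS", "CODE_GENERATION_STRATEGIES",
   "TESTING_GUIDELINES", "TESTING_STATUS_REPORT", "TEST_COVERAGE_ANALYSIS",
   "CURRENT_STATUS", "IMPLEMENTATION_ROADMAP", "IMPLEMENTATION_DECISION",
   "GENERIC_IMPLEMENTATION_PROGRESS", "GENERIC_TYPE_SCOPING_ANALYSIS",
   "KOTLIN_COMPILER_IR_API_GUIDE", "FINAL_COMPILE_TIME_SOLUTION", "COMPILE_TIME_EXAMPLES"]

theorem pvAlt_not_found (f : String) (h : f ∉ pvAllNames) :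
    get_category_for_file_alt f = (none, none) := by
  have hk : FILE_TO_CATEGORY.keys = pvAllNames := by rfl
  rw [get_category_for_file_alt, PySem.Dict.getD_of_not_contains]
  rw [PySem.Dict.contains_eq_decide_mem_keys, hk]
  simp [h]

theorem pvA_not_found (f : String) (h : f ∉ pvAllNames) :
    get_category_for_file f = (none, none) := by
  have hI : CATEGORY_INDEX_FILES.items =
    [("Getting Started", "getting-started"), ("Architecture", "architecture"),
     ("Specifications", "specifications"), ("Testing", "testing"),
     ("Implementation", "implementation")] := by rfl
  have hM : CATEGORY_MAPPING.items =
    [("Getting Started", ["README"]),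
     ("Architecture", ["ARCHITECTURE", "METRO_FIR_IR_SPECIFICATIONS", "IR_NATIVE_DEMO", "IR_NATIVE_DEMONSTRATION"]),
     ("Specifications", ["API_SPECIFICATIONS", "COMPILE_TIME_GENERIC_SOLUTIONS", "CODE_GENERATION_STRATEGIES"]),
     ("Testing", ["TESTING_GUIDELINES", "TESTING_STATUS_REPORT", "TEST_COVERAGE_ANALYSIS"]),
     ("Implementation", ["CURRENT_STATUS", "IMPLEMENTATION_ROADMAP", "IMPLEMENTATION_DECISION",
       "GENERIC_IMPLEMENTATION_PROGRESS", "GENERIC_TYPE_SCOPING_ANALYSIS",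
       "KOTLIN_COMPILER_IR_API_GUIDE", "FINAL_COMPILE_TIME_SOLUTION", "COMPILE_TIME_EXAMPLES"])] := by rfl
  simp only [pvAllNames, List.mem_cons, List.not_mem_nil, or_false, not_or] at h
  obtain ⟨h1,h2,h3,h4,h5,h6,h7,h8,h9,h10,h11,h12,h13,h14,h15,h16,h17,h18,h19,h20,h21,h22,h23,h24⟩ := h
  simp [get_category_for_file, hI, hM, getCatLoop1, getCatLoop2,
    h1,h2,h3,h4,h5,h6,h7,h8,h9,h10,h11,h12,h13,h14,h15,h16,h17,h18,h19,h20,h21,h22,h23,h24]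

-- ===== VERDICT (by name: the statement is the Claim_ definition above) =====
theorem get_category_for_file_spec : Claim_equal_get_category_for_file := by
  intro f _
  show get_category_for_file f = get_category_for_file_alt f
  by_cases h : f ∈ pvAllNames
  · fin_cases h <;> rfl
  · rw [pvA_not_found f h, pvAlt_not_found f h]
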